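-- pv_equiv track=rewrite | github.com/cyrianberthod/Caramel-et-beurre-sal- | Programme_final.py | poids_fenetre
-- ===== SOURCE A (Python) =====
-- croix=1
--
-- rond=2
--
-- def chg_joueur(joueur_local):
--     if joueur_local==croix:
--         joueur_local=rond
--     else:
--         joueur_local=croix
--     return joueur_local
--
-- n=10
--
-- def poids_fenetre(fenetre, joueurIA, mode_IA): #joueurIA = celui qui joue au rg du plateau
-- # 1 : mode offensive 2: mode defensif
--     poids= 0
--     adv=chg_joueur(joueurIA)
--
--     #commun quelque soit le mode de l'IA
--     if fenetre.count(joueurIA) == n: #l'IA a une ligne gagnante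
--         poids+= 1000000
--     elif fenetre.count(adv) == n: #l'adversaire gagne
--             poids -=1000000
--
--    #selon le mode de l'IA
--     if mode_IA==1:#plus l'IA aligne de pions plus la fenêtre a un poids élevé
--         for k in range(n):
--             if fenetre.count(joueurIA) == k :
--                 poids += k*10
--
--     elif mode_IA==2: #moins l'adversaire aligne de pions plus la fenêtre a un poids élevé
--         for k in range(n):
--             if fenetre.count(adv) == k :
--                 poids += (n-k)*10
--
--     return poids
-- ===== SOURCE B (Python) =====
-- def poids_fenetre(fenetre, joueurIA, mode_IA):
--     # single pass over the window with two accumulators, then one final scoring step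
--     adv = 2 if joueurIA == 1 else 1
--     cj = 0
--     ca = 0
--     for x in fenetre:
--         if x == joueurIA:
--             cj += 1
--         if x == adv:
--             ca += 1
--     base = 1000000 if cj == 10 else (-1000000 if ca == 10 else 0)
--     if mode_IA == 1:
--         return base + (cj * 10 if cj < 10 else 0)
--     if mode_IA == 2:
--         return base + ((10 - ca) * 10 if ca < 10 else 0)
--     return base
-- ===== Notes on version B (the rewrite author's own statement) =====
-- stated objective: alternative
-- what changed: Replaces A's repeated full-window .count scans (the win/lose test plus one .count per k of range(n)) by a single fold over the window that carries both counts as accumulators and produces the score once at the end.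
import Mathlib
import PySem

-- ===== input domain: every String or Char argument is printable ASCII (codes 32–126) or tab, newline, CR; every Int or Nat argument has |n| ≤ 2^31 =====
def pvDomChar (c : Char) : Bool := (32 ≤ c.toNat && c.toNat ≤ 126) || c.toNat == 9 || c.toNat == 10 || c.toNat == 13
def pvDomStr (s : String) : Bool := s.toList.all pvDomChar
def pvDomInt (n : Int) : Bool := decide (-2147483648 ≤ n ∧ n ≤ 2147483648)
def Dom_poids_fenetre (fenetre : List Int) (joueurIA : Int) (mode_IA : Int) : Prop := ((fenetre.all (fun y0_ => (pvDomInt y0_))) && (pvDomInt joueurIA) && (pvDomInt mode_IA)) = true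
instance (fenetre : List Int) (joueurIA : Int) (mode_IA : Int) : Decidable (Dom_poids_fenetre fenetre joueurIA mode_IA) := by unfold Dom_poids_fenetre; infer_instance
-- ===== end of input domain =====

-- B replaces A's repeated .count scans in a range(n) loop by one fold over the window carrying both counts (objective: alternative, same asymptotic cost for fixed n).

-- ===== PORT A =====
-- helper = Python chg_joueur
def chg_joueur (joueur_local : Int) : Int := if joueur_local = 1 then 2 else 1

-- literal port of A: common win/lose block, then a range(n) loop recounting the window each k
def poids_fenetre (fenetre : List Int) (joueurIA : Int) (mode_IA : Int) : Int :=
  let adv := chg_joueur joueurIA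
  let poids : Int := 0
  let poids : Int :=
    if (PySem.List.count fenetre joueurIA : Int) = 10 then poids + 1000000
    else if (PySem.List.count fenetre adv : Int) = 10 then poids - 1000000
    else poids
  if mode_IA = 1 then
    (PySem.List.pyRange 0 10 1).foldl
      (fun p k => if (PySem.List.count fenetre joueurIA : Int) = k then p + k * 10 else p) poids
  else if mode_IA = 2 then
    (PySem.List.pyRange 0 10 1).foldl
      (fun p k => if (PySem.List.count fenetre adv : Int) = k then p + (10 - k) * 10 else p) poids
  else poids

-- ===== PORT B =====
-- B's inner 'finish(cj, ca)': the score from the two accumulated counts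
def pfFinish (mode_IA cj ca : Int) : Int :=
  let base : Int := if cj = 10 then 1000000 else if ca = 10 then -1000000 else 0
  if mode_IA = 1 then base + (if cj < 10 then cj * 10 else 0)
  else if mode_IA = 2 then base + (if ca < 10 then (10 - ca) * 10 else 0)
  else base

-- port of B: one fold over the window carrying both counts, score computed once at the end
def poids_fenetre_alt (fenetre : List Int) (joueurIA : Int) (mode_IA : Int) : Int :=
  let adv : Int := if joueurIA = 1 then 2 else 1
  let p : Int × Int := fenetre.foldl
    (fun acc x => (acc.1 + (if x = joueurIA then 1 else 0),
                   acc.2 + (if x = adv then 1 else 0))) (0, 0)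
  pfFinish mode_IA p.1 p.2

-- ===== PRECONDITION & SPEC =====
def Spec_poids_fenetre (fenetre : List Int) (joueurIA : Int) (mode_IA : Int) (out : Int) : Prop := out = poids_fenetre_alt fenetre joueurIA mode_IA
instance (fenetre : List Int) (joueurIA : Int) (mode_IA : Int) (out : Int) : Decidable (Spec_poids_fenetre fenetre joueurIA mode_IA out) := by unfold Spec_poids_fenetre; infer_instance

-- ===== CLAIM (what is proved, stated in full; the proofs are below) =====
def Claim_equal_poids_fenetre : Prop := ∀ (fenetre : List Int) (joueurIA : Int) (mode_IA : Int), Dom_poids_fenetre fenetre joueurIA mode_IA → Spec_poids_fenetre fenetre joueurIA mode_IA (poids_fenetre fenetre joueurIA mode_IA)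

-- ===== LEMMAS AND PROOFS =====
lemma pyRange10 : PySem.List.pyRange 0 10 1 = [0,1,2,3,4,5,6,7,8,9] := by decide

lemma loop1 (c p : Int) (hc : 0 ≤ c) :
    ([0,1,2,3,4,5,6,7,8,9] : List Int).foldl
      (fun q k => if c = k then q + k * 10 else q) p
      = p + (if c < 10 then c * 10 else 0) := by
  rcases lt_or_ge c 10 with h | h
  · rw [if_pos h]
    interval_cases c <;> norm_num [List.foldl_cons, List.foldl_nil]
  · rw [if_neg (by omega)]
    simp only [List.foldl_cons, List.foldl_nil,
      if_neg (show ¬ c = 0 by omega), if_neg (show ¬ c = 1 by omega),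
      if_neg (show ¬ c = 2 by omega), if_neg (show ¬ c = 3 by omega),
      if_neg (show ¬ c = 4 by omega), if_neg (show ¬ c = 5 by omega),
      if_neg (show ¬ c = 6 by omega), if_neg (show ¬ c = 7 by omega),
      if_neg (show ¬ c = 8 by omega), if_neg (show ¬ c = 9 by omega)]
    omega

lemma loop2 (c p : Int) (hc : 0 ≤ c) :
    ([0,1,2,3,4,5,6,7,8,9] : List Int).foldl
      (fun q k => if c = k then q + (10 - k) * 10 else q) p
      = p + (if c < 10 then (10 - c) * 10 else 0) := by
  rcases lt_or_ge c 10 with h | h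
  · rw [if_pos h]
    interval_cases c <;> norm_num [List.foldl_cons, List.foldl_nil]
  · rw [if_neg (by omega)]
    simp only [List.foldl_cons, List.foldl_nil,
      if_neg (show ¬ c = 0 by omega), if_neg (show ¬ c = 1 by omega),
      if_neg (show ¬ c = 2 by omega), if_neg (show ¬ c = 3 by omega),
      if_neg (show ¬ c = 4 by omega), if_neg (show ¬ c = 5 by omega),
      if_neg (show ¬ c = 6 by omega), if_neg (show ¬ c = 7 by omega),
      if_neg (show ¬ c = 8 by omega), if_neg (show ¬ c = 9 by omega)]
    omega

-- accumulator invariant of B's single pass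
lemma pfFold_spec (j a : Int) (rest : List Int) (cj ca : Int) :
    rest.foldl (fun (acc : Int × Int) x => (acc.1 + (if x = j then 1 else 0),
        acc.2 + (if x = a then 1 else 0))) (cj, ca)
      = (cj + (PySem.List.count rest j : Int), ca + (PySem.List.count rest a : Int)) := by
  induction rest generalizing cj ca with
  | nil => simp [PySem.List.count]
  | cons x rest ih =>
      simp only [List.foldl_cons, ih, PySem.List.count, List.count_cons]
      by_cases hj : x = j <;> by_cases ha : x = a <;>
        simp [hj, ha] <;> ring_nf <;> simp

-- ===== VERDICT (by name: the statement is the Claim_ definition above) =====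
theorem poids_fenetre_spec : Claim_equal_poids_fenetre := by
  intro fenetre joueurIA mode_IA _
  unfold Spec_poids_fenetre poids_fenetre poids_fenetre_alt chg_joueur
  simp only [pfFold_spec]
  simp only [pyRange10, Int.zero_add]
  rw [loop1 _ _ (by positivity), loop2 _ _ (by positivity)]
  simp only [pfFinish]
  split_ifs <;> omega
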